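-- pv_equiv track=rewrite | github.com/MegaGiciorPortas/WDI-Zadania | 02-tablice_jednowymiarowe/2.75.py | func
-- ===== SOURCE A (Python) =====
-- def func(T):
--     if len(T) < 2:
--         return 0
--
--     najdluzszy_dodatni = 1
--     najdluzszy_ujemny = 1
--     licznik = 2
--     r = T[1] - T[0]
--     for i in range(2, len(T)):
--         if T[i] - T[i - 1] == r:
--             licznik += 1
--         else:
--             if r > 0:
--                 if licznik > najdluzszy_dodatni:
--                     najdluzszy_dodatni = licznik
--             elif r < 0:
--                 if licznik > najdluzszy_ujemny:
--                     najdluzszy_ujemny = licznik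
--             licznik = 2
--             r = T[i] - T[i - 1]
--     if r > 0:
--         if licznik > najdluzszy_dodatni:
--             najdluzszy_dodatni = licznik
--     elif r < 0:
--         if licznik > najdluzszy_ujemny:
--             najdluzszy_ujemny = licznik
--
--     return najdluzszy_dodatni - najdluzszy_ujemny
-- ===== SOURCE B (Python) =====
-- def func(T):
--     # Group the consecutive-difference list into maximal runs of an equal value;
--     # a group of j - i equal diffs is an element run of length j - i + 1.
--     diffs = [T[i + 1] - T[i] for i in range(len(T) - 1)]
--     pos = neg = 1
--     i = 0
--     while i < len(diffs):
--         j = i + 1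
--         while j < len(diffs) and diffs[j] == diffs[i]:
--             j += 1
--         run = j - i + 1
--         if diffs[i] > 0:
--             pos = max(pos, run)
--         elif diffs[i] < 0:
--             neg = max(neg, run)
--         i = j
--     return pos - neg
-- ===== Notes on version B (the rewrite author's own statement) =====
-- stated objective: alternative
-- what changed: B first materialises the consecutive-difference list and then scans it as maximal groups of equal differences (run length = group size + 1), instead of A's single index loop carrying a running counter and pending-run state with duplicated flush logic.
import Mathlib
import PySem

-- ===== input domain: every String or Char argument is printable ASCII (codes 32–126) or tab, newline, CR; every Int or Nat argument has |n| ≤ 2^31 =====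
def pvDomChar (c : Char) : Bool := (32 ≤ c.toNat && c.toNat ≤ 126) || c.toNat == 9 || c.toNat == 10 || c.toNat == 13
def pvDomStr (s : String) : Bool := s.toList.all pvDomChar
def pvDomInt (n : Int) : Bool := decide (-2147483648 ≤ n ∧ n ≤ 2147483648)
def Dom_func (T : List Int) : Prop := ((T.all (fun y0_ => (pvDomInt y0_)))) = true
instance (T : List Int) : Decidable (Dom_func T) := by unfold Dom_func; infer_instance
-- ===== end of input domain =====

-- B scans the precomputed difference list as maximal groups of equal values (alternative decomposition, same cost as A's running-counter index loop).

-- ===== PORT A =====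
-- the flush 'if r > 0: … elif r < 0: …' that A performs on a run break and at the end
def pvFinA (p n c r : Int) : Int × Int :=
  if r > 0 then (if c > p then c else p, n)
  else if r < 0 then (p, if c > n then c else n)
  else (p, n)

-- A's loop body (state = (najdluzszy_dodatni, najdluzszy_ujemny, licznik, r))
def pvStepA (T : List Int) (s : Int × Int × Int × Int) (i : Int) : Int × Int × Int × Int :=
  let d := PySem.List.pyGetD T i 0 - PySem.List.pyGetD T (i - 1) 0
  if d = s.2.2.2 then (s.1, s.2.1, s.2.2.1 + 1, s.2.2.2)
  else
    let f := pvFinA s.1 s.2.1 s.2.2.1 s.2.2.2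
    (f.1, f.2, 2, d)

def func (T : List Int) : Int :=
  if (T.length : Int) < 2 then 0
  else
    let r0 := PySem.List.pyGetD T 1 0 - PySem.List.pyGetD T 0 0
    let s := (PySem.List.pyRange 2 (T.length : Int) 1).foldl (pvStepA T) (1, 1, 2, r0)
    let f := pvFinA s.1 s.2.1 s.2.2.1 s.2.2.2
    f.1 - f.2

-- ===== PORT B =====
-- B's outer while loop: consume one maximal group of equal diffs per step
def pvGo (pos neg : Int) : List Int → Int × Int
  | [] => (pos, neg)
  | r :: tl =>
    let g := tl.takeWhile (· == r)
    let run : Int := (g.length : Int) + 2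
    let pos' := if r > 0 then max pos run else pos
    let neg' := if r > 0 then neg else if r < 0 then max neg run else neg
    pvGo pos' neg' (tl.drop g.length)
termination_by l => l.length
decreasing_by simp

def func_alt (T : List Int) : Int :=
  let ds := (PySem.List.pyRange 0 ((T.length : Int) - 1) 1).map
      (fun i => PySem.List.pyGetD T (i + 1) 0 - PySem.List.pyGetD T i 0)
  let pn := pvGo 1 1 ds
  pn.1 - pn.2

-- ===== PRECONDITION & SPEC =====
def Spec_func (T : List Int) (out : Int) : Prop := out = func_alt T
instance (T : List Int) (out : Int) : Decidable (Spec_func T out) := by unfold Spec_func; infer_instance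

-- ===== CLAIM (what is proved, stated in full; the proofs are below) =====
def Claim_equal_func : Prop := ∀ (T : List Int), Dom_func T → Spec_func T (func T)

-- ===== LEMMAS AND PROOFS =====

-- pure version of A's loop body, fed the difference directly
def pvStepD (s : Int × Int × Int × Int) (d : Int) : Int × Int × Int × Int :=
  if d = s.2.2.2 then (s.1, s.2.1, s.2.2.1 + 1, s.2.2.2)
  else
    let f := pvFinA s.1 s.2.1 s.2.2.1 s.2.2.2
    (f.1, f.2, 2, d)

def pvDiffs (T : List Int) : List Int := List.zipWith (fun a b => b - a) T T.tail

theorem pvFinA_pair (p n c r : Int) :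
    pvFinA p n c r =
      (if r > 0 then max p c else p,
       if r > 0 then n else if r < 0 then max n c else n) := by
  unfold pvFinA
  split_ifs <;> simp [Prod.ext_iff, Int.max_def] <;> omega

-- A's fold over a difference list, then flushed, equals B's group scan started
-- with the current (still open) run of value r and count c already absorbed.
theorem pvAfold (ds : List Int) : ∀ (p n c r : Int),
    (pvFinA (ds.foldl pvStepD (p, n, c, r)).1 (ds.foldl pvStepD (p, n, c, r)).2.1
       (ds.foldl pvStepD (p, n, c, r)).2.2.1 (ds.foldl pvStepD (p, n, c, r)).2.2.2)
    = pvGo (if r > 0 then max p (c + ((ds.takeWhile (· == r)).length : Int)) else p)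
           (if r > 0 then n
            else if r < 0 then max n (c + ((ds.takeWhile (· == r)).length : Int)) else n)
           (ds.drop (ds.takeWhile (· == r)).length) := by
  induction ds with
  | nil => intro p n c r; rw [pvGo.eq_def]; simp [pvFinA_pair]
  | cons e ds ih =>
    intro p n c r
    by_cases he : e = r
    · subst he
      rw [List.foldl_cons, show pvStepD (p, n, c, e) e = (p, n, c + 1, e) by simp [pvStepD]]
      rw [show List.takeWhile (· == e) (e :: ds) = e :: List.takeWhile (· == e) ds by
        simp]
      simp only [List.length_cons, List.drop_succ_cons]
      have := ih p n (c + 1) e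
      have hc : ∀ t : Nat, c + ((t + 1 : Nat) : Int) = (c + 1) + (t : Int) := by
        intro t; push_cast; ring
      rw [hc]
      exact this
    · have hbe : (e == r) = false := by simp [he]
      rw [List.foldl_cons,
        show pvStepD (p, n, c, r) e = ((pvFinA p n c r).1, (pvFinA p n c r).2, 2, e) by
          simp [pvStepD, he]]
      rw [ih]
      rw [show List.takeWhile (· == r) (e :: ds) = [] by simp [hbe]]
      simp only [List.length_nil, Nat.cast_zero, add_zero, List.drop_zero]
      conv_rhs => rw [pvGo.eq_def]
      simp only [pvFinA_pair]
      ring_nf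

-- A's indexed loop over range(k, len(T)) is the pure fold over the diffs from index k-1
theorem pvBridge (T : List Int) :
    ∀ (m k : Nat), 1 ≤ k → k + m = T.length → ∀ (s : Int × Int × Int × Int),
    (PySem.List.pyRange (k : Int) (T.length : Int) 1).foldl (pvStepA T) s
      = ((pvDiffs T).drop (k - 1)).foldl pvStepD s := by
  intro m
  induction m with
  | zero =>
    intro k hk1 hk2 s
    have hlen : (pvDiffs T).length = T.length - 1 := by
      simp [pvDiffs, List.length_tail]
    rw [PySem.List.pyRange_one_eq_nil (by omega)]
    rw [List.drop_eq_nil_of_le (by omega)]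
    simp
  | succ m ih =>
    intro k hk1 hk2 s
    have hkl : k < T.length := by omega
    have hdl : k - 1 < (pvDiffs T).length := by
      simp [pvDiffs, List.length_tail]; omega
    rw [PySem.List.pyRange_one_cons (by exact_mod_cast hkl)]
    rw [List.drop_eq_getElem_cons hdl]
    simp only [List.foldl_cons]
    have hstep : pvStepA T s (k : Int) = pvStepD s ((pvDiffs T)[k - 1]) := by
      have h1 : PySem.List.pyGetD T (k : Int) 0 = T[k] :=
        PySem.List.pyGetD_ofNat T k 0 hkl
      have h2 : PySem.List.pyGetD T ((k : Int) - 1) 0 = T[k - 1] := by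
        rw [show ((k : Int) - 1) = ((k - 1 : Nat) : Int) by omega]
        exact PySem.List.pyGetD_ofNat T (k - 1) 0 (by omega)
      have hd : (pvDiffs T)[k - 1] = T[k] - T[k - 1] := by
        simp only [pvDiffs, List.getElem_zipWith]
        rw [List.getElem_tail]
        congr 2
        omega
      simp only [pvStepA, pvStepD, h1, h2, hd]
    rw [hstep]
    rw [show ((k : Int) + 1) = ((k + 1 : Nat) : Int) by push_cast; ring]
    have hih := ih (k + 1) (by omega) (by omega) (pvStepD s ((pvDiffs T)[k - 1]))
    simp only [Nat.add_sub_cancel] at hih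
    rw [show k - 1 + 1 = k by omega]
    exact hih

-- B's comprehension builds exactly the difference list
theorem pvDs_eq (T : List Int) :
    (PySem.List.pyRange 0 ((T.length : Int) - 1) 1).map
        (fun i => PySem.List.pyGetD T (i + 1) 0 - PySem.List.pyGetD T i 0)
      = pvDiffs T := by
  apply List.ext_getElem
  · simp [PySem.List.length_pyRange_one, pvDiffs, List.length_tail]
  · intro k hk1 hk2
    have hlen : k < T.length - 1 := by
      simp [PySem.List.length_pyRange_one] at hk1
      omega
    simp only [List.getElem_map, PySem.List.getElem_pyRange_one, zero_add]
    have h1 : PySem.List.pyGetD T ((k : Int) + 1) 0 = T[k + 1] := by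
      rw [show ((k : Int) + 1) = ((k + 1 : Nat) : Int) by push_cast; ring]
      exact PySem.List.pyGetD_ofNat T (k + 1) 0 (by omega)
    have h2 : PySem.List.pyGetD T (k : Int) 0 = T[k] :=
      PySem.List.pyGetD_ofNat T k 0 (by omega)
    simp only [h1, h2, pvDiffs, List.getElem_zipWith, List.getElem_tail]

-- ===== VERDICT (by name: the statement is the Claim_ definition above) =====
theorem func_spec : Claim_equal_func := by
  intro T _
  unfold Spec_func func func_alt
  rw [pvDs_eq]
  by_cases h2 : (T.length : Int) < 2
  · have : pvDiffs T = [] := by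
      cases T with
      | nil => simp [pvDiffs]
      | cons a t =>
        cases t with
        | nil => simp [pvDiffs]
        | cons b u => simp at h2; omega
    simp [h2, this, pvGo]
  · simp only [if_neg h2]
    have hlen : 2 ≤ T.length := by exact_mod_cast not_lt.mp h2
    have hd0 : 0 < (pvDiffs T).length := by
      simp [pvDiffs, List.length_tail]; omega
    have hb := pvBridge T (T.length - 2) 2 (by omega) (by omega)
      (1, 1, 2, PySem.List.pyGetD T 1 0 - PySem.List.pyGetD T 0 0)
    simp only [Nat.cast_ofNat, show (2 : Nat) - 1 = 1 from rfl] at hb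
    rw [hb]
    rw [pvAfold]
    have hD : pvDiffs T = (pvDiffs T)[0] :: (pvDiffs T).drop 1 := by
      rw [← List.drop_eq_getElem_cons hd0]
      simp
    have hr0 : PySem.List.pyGetD T 1 0 - PySem.List.pyGetD T 0 0 = (pvDiffs T)[0] := by
      have h1 : PySem.List.pyGetD T 1 0 = T[1] := by
        rw [show (1 : Int) = ((1 : Nat) : Int) by norm_num]
        exact PySem.List.pyGetD_ofNat T 1 0 (by omega)
      have h2' : PySem.List.pyGetD T 0 0 = T[0] := by
        rw [show (0 : Int) = ((0 : Nat) : Int) by norm_num]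
        exact PySem.List.pyGetD_ofNat T 0 0 (by omega)
      simp [h1, h2', pvDiffs, List.getElem_zipWith, List.getElem_tail]
      rfl
    conv_rhs => rw [hD, pvGo.eq_def]
    simp only [hr0]
    ring_nf
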